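-- pv_equiv track=rewrite | github.com/itri-k2/streaming-example | main.py | determine_intent_type
-- ===== SOURCE A (Python) =====
-- def determine_intent_type(keywords):
--     # Filter out empty string values
--     filtered_keywords = {k: v for k, v in keywords.items() if v != ""}
--
--     if any(key in filtered_keywords for key in ["Weak RSRP ratio", "Low SINR ratio", "Weak RSRP threshold", "Low SINR threshold"]):
--         return "Coverage Intent"
--     elif any(key in filtered_keywords for key in ["Average DL RAN UE Throughput", "Low DL RAN UE Throughput Ratio", "Low DL RAN UE Throughput Threshold", "Average UL RAN UE Throughput", "Low UL RAN UE Throughput Ratio", "Low UL RAN UE Throughput Threshold"]):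
--         return "UE Throughput Intent"
--     elif any(key in filtered_keywords for key in ["Average DL PRB Load", "Average UL PRB Load", "High DL PRB Load Ratio", "High DL PRB Load Threshold", "High UL PRB Load Ratio", "High UL PRB Load Threshold"]):
--         return "RAN Capacity Intent"
--     else:
--         return "Unknown Intent"
-- ===== SOURCE B (Python) =====
-- KEYWORD_TO_CATEGORY = {
--     "Weak RSRP ratio": 0,
--     "Low SINR ratio": 0,
--     "Weak RSRP threshold": 0,
--     "Low SINR threshold": 0,
--     "Average DL RAN UE Throughput": 1,
--     "Low DL RAN UE Throughput Ratio": 1,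
--     "Low DL RAN UE Throughput Threshold": 1,
--     "Average UL RAN UE Throughput": 1,
--     "Low UL RAN UE Throughput Ratio": 1,
--     "Low UL RAN UE Throughput Threshold": 1,
--     "Average DL PRB Load": 2,
--     "Average UL PRB Load": 2,
--     "High DL PRB Load Ratio": 2,
--     "High DL PRB Load Threshold": 2,
--     "High UL PRB Load Ratio": 2,
--     "High UL PRB Load Threshold": 2,
-- }
--
-- LABELS = ["Coverage Intent", "UE Throughput Intent", "RAN Capacity Intent", "Unknown Intent"]
--
-- def determine_intent_type(keywords):
--     best = 3
--     for k, v in keywords.items():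
--         if v != "":
--             c = KEYWORD_TO_CATEGORY.get(k)
--             if c is not None and c < best:
--                 best = c
--     return LABELS[best]
-- ===== Notes on version B (the rewrite author's own statement) =====
-- stated objective: alternative
-- what changed: B replaces A's filtered-dict rebuild plus three fixed keyword-list membership scans by a precomputed keyword-to-category index and a single pass over the dict that keeps the minimum category among non-empty-valued entries, resolving the priority at the end via a label table.
import Mathlib
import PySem

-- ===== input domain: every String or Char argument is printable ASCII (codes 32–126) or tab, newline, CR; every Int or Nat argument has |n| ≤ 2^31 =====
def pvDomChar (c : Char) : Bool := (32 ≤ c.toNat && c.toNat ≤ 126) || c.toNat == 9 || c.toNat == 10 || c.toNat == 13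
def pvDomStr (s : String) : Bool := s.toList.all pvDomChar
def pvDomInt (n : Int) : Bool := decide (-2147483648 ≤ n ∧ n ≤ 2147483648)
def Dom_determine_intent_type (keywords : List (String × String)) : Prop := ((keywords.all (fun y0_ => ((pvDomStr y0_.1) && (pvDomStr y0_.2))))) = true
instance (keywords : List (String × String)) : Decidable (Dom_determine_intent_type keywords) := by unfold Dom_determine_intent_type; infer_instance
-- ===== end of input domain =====

-- B replaces A's three fixed-list membership scans over the filtered dict by one pass over
-- the dict with a keyword→category index, resolving the priority at the end (objective: alternative).

-- ===== PORT A =====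
def pvCovKeys : List String :=
  ["Weak RSRP ratio", "Low SINR ratio", "Weak RSRP threshold", "Low SINR threshold"]
def pvThrKeys : List String :=
  ["Average DL RAN UE Throughput", "Low DL RAN UE Throughput Ratio",
   "Low DL RAN UE Throughput Threshold", "Average UL RAN UE Throughput",
   "Low UL RAN UE Throughput Ratio", "Low UL RAN UE Throughput Threshold"]
def pvCapKeys : List String :=
  ["Average DL PRB Load", "Average UL PRB Load", "High DL PRB Load Ratio",
   "High DL PRB Load Threshold", "High UL PRB Load Ratio", "High UL PRB Load Threshold"]

def determine_intent_type (keywords : List (String × String)) : String :=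
  -- the dict parameter (assoc list) read as a Python dict, then the filtering comprehension
  let filtered : PySem.Dict String String :=
    PySem.Dict.mk (((PySem.Dict.ofList keywords).items).filter (fun kv => !(kv.2 == "")))
  if pvCovKeys.any (fun key => filtered.contains key) then "Coverage Intent"
  else if pvThrKeys.any (fun key => filtered.contains key) then "UE Throughput Intent"
  else if pvCapKeys.any (fun key => filtered.contains key) then "RAN Capacity Intent"
  else "Unknown Intent"

-- ===== PORT B =====
def pvIndex : PySem.Dict String Nat := PySem.Dict.mk
  [("Weak RSRP ratio", 0), ("Low SINR ratio", 0), ("Weak RSRP threshold", 0),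
   ("Low SINR threshold", 0),
   ("Average DL RAN UE Throughput", 1), ("Low DL RAN UE Throughput Ratio", 1),
   ("Low DL RAN UE Throughput Threshold", 1), ("Average UL RAN UE Throughput", 1),
   ("Low UL RAN UE Throughput Ratio", 1), ("Low UL RAN UE Throughput Threshold", 1),
   ("Average DL PRB Load", 2), ("Average UL PRB Load", 2), ("High DL PRB Load Ratio", 2),
   ("High DL PRB Load Threshold", 2), ("High UL PRB Load Ratio", 2),
   ("High UL PRB Load Threshold", 2)]

def pvLabels : List String :=
  ["Coverage Intent", "UE Throughput Intent", "RAN Capacity Intent", "Unknown Intent"]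

def pvStep (best : Nat) (kv : String × String) : Nat :=
  if kv.2 == "" then best
  else
    match pvIndex.get? kv.1 with
    | some c => if c < best then c else best
    | none => best

def determine_intent_type_alt (keywords : List (String × String)) : String :=
  let best := ((PySem.Dict.ofList keywords).items).foldl pvStep 3
  pvLabels.getD best "Unknown Intent"   -- LABELS[best]; best ≤ 3 always holds

-- ===== PRECONDITION & SPEC =====
def Spec_determine_intent_type (keywords : List (String × String)) (out : String) : Prop := out = determine_intent_type_alt keywords
instance (keywords : List (String × String)) (out : String) : Decidable (Spec_determine_intent_type keywords out) := by unfold Spec_determine_intent_type; infer_instance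

-- ===== CLAIM (what is proved, stated in full; the proofs are below) =====
def Claim_equal_determine_intent_type : Prop := ∀ (keywords : List (String × String)), Dom_determine_intent_type keywords → Spec_determine_intent_type keywords (determine_intent_type keywords)

-- ===== LEMMAS AND PROOFS =====

-- category of a key under B's index (3 = unknown)
def pvCatVal (k : String) : Nat := (pvIndex.get? k).getD 3

-- the minimum category present among non-empty-valued entries (3 if none)
def pvCatMin : List (String × String) → Nat
  | [] => 3
  | kv :: t => if kv.2 == "" then pvCatMin t else min (pvCatVal kv.1) (pvCatMin t)

theorem pvMem_items_le (k : String) (c : Nat) (h : (k, c) ∈ pvIndex.items) : c ≤ 2 := by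
  simp [pvIndex] at h
  rcases h with ⟨_,rfl⟩|⟨_,rfl⟩|⟨_,rfl⟩|⟨_,rfl⟩|⟨_,rfl⟩|⟨_,rfl⟩|⟨_,rfl⟩|⟨_,rfl⟩|⟨_,rfl⟩|⟨_,rfl⟩|⟨_,rfl⟩|⟨_,rfl⟩|⟨_,rfl⟩|⟨_,rfl⟩|⟨_,rfl⟩|⟨_,rfl⟩ <;> omega

theorem pvCatVal_le_three (k : String) : pvCatVal k ≤ 3 := by
  unfold pvCatVal
  cases hg : pvIndex.get? k with
  | none => simp
  | some c =>
    have := pvMem_items_le k c (PySem.Dict.mem_items_of_get?_eq_some pvIndex hg)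
    simp; omega

theorem pvCatMin_le_three (L : List (String × String)) : pvCatMin L ≤ 3 := by
  induction L with
  | nil => simp [pvCatMin]
  | cons kv t ih => simp only [pvCatMin]; split <;> omega

theorem pvMem_items_val (k : String) (c : Nat) (h : (k, c) ∈ pvIndex.items) :
    (c = 0 → k ∈ pvCovKeys) ∧ (c = 1 → k ∈ pvThrKeys) ∧ (c = 2 → k ∈ pvCapKeys) := by
  simp [pvIndex] at h
  simp [pvCovKeys, pvThrKeys, pvCapKeys]
  rcases h with ⟨rfl,rfl⟩|⟨rfl,rfl⟩|⟨rfl,rfl⟩|⟨rfl,rfl⟩|⟨rfl,rfl⟩|⟨rfl,rfl⟩|⟨rfl,rfl⟩|⟨rfl,rfl⟩|⟨rfl,rfl⟩|⟨rfl,rfl⟩|⟨rfl,rfl⟩|⟨rfl,rfl⟩|⟨rfl,rfl⟩|⟨rfl,rfl⟩|⟨rfl,rfl⟩|⟨rfl,rfl⟩ <;> simp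

theorem pvCatVal_eq_iff (k : String) (c : Nat) (keys : List String)
    (hc : (c = 0 ∧ keys = pvCovKeys) ∨ (c = 1 ∧ keys = pvThrKeys) ∨ (c = 2 ∧ keys = pvCapKeys))
    (hmem : ∀ k' ∈ keys, pvCatVal k' = c) :
    pvCatVal k = c ↔ k ∈ keys := by
  constructor
  · intro h
    unfold pvCatVal at h
    cases hg : pvIndex.get? k with
    | none =>
      rw [hg] at h; simp at h
      rcases hc with ⟨hc,_⟩|⟨hc,_⟩|⟨hc,_⟩ <;> omega
    | some c' =>
      rw [hg] at h; simp at h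
      have hv := pvMem_items_val k c' (PySem.Dict.mem_items_of_get?_eq_some pvIndex hg)
      rcases hc with ⟨rfl,rfl⟩|⟨rfl,rfl⟩|⟨rfl,rfl⟩
      · exact hv.1 h
      · exact hv.2.1 h
      · exact hv.2.2 h
  · exact hmem k

theorem pvCov_val : ∀ k ∈ pvCovKeys, pvCatVal k = 0 := by
  intro k h; simp [pvCovKeys] at h
  rcases h with rfl|rfl|rfl|rfl <;> decide

theorem pvThr_val : ∀ k ∈ pvThrKeys, pvCatVal k = 1 := by
  intro k h; simp [pvThrKeys] at h
  rcases h with rfl|rfl|rfl|rfl|rfl|rfl <;> decide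

theorem pvCap_val : ∀ k ∈ pvCapKeys, pvCatVal k = 2 := by
  intro k h; simp [pvCapKeys] at h
  rcases h with rfl|rfl|rfl|rfl|rfl|rfl <;> decide

theorem pvCatVal_cov (k : String) : pvCatVal k = 0 ↔ k ∈ pvCovKeys :=
  pvCatVal_eq_iff k 0 pvCovKeys (Or.inl ⟨rfl, rfl⟩) pvCov_val

theorem pvCatVal_thr (k : String) : pvCatVal k = 1 ↔ k ∈ pvThrKeys :=
  pvCatVal_eq_iff k 1 pvThrKeys (Or.inr (Or.inl ⟨rfl, rfl⟩)) pvThr_val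

theorem pvCatVal_cap (k : String) : pvCatVal k = 2 ↔ k ∈ pvCapKeys :=
  pvCatVal_eq_iff k 2 pvCapKeys (Or.inr (Or.inr ⟨rfl, rfl⟩)) pvCap_val

theorem pvStep_eq (b : Nat) (kv : String × String) (hb : b ≤ 3) :
    pvStep b kv = if kv.2 == "" then b else min b (pvCatVal kv.1) := by
  simp only [pvStep]
  cases h : pvIndex.get? kv.1 with
  | none => split <;> simp [pvCatVal, h] <;> omega
  | some c => split <;> simp [pvCatVal, h, Nat.min_def] <;> split_ifs <;> omega

theorem pvFoldl_step (L : List (String × String)) :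
    ∀ b, b ≤ 3 → L.foldl pvStep b = min b (pvCatMin L) := by
  induction L with
  | nil => intro b hb; simp [pvCatMin]; omega
  | cons kv t ih =>
    intro b hb
    simp only [List.foldl_cons, pvStep_eq b kv hb, pvCatMin]
    split
    · exact ih b hb
    · rw [ih _ (by have := pvCatVal_le_three kv.1; omega)]; omega

-- A's membership test over the filtered dict, as an existential over the raw items
theorem pvAny_filter (L : List (String × String)) (keys : List String) :
    (keys.any (fun key =>
        (PySem.Dict.mk (L.filter (fun kv => !(kv.2 == "")))).contains key)) = true
      ↔ ∃ kv ∈ L, ¬kv.2 = "" ∧ kv.1 ∈ keys := by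
  simp only [PySem.Dict.contains, List.any_eq_true, List.mem_filter]
  constructor
  · rintro ⟨key, hk, kv, ⟨hkv, hne⟩, hbeq⟩
    have : kv.1 = key := by simpa using hbeq
    exact ⟨kv, hkv, by simpa using hne, this ▸ hk⟩
  · rintro ⟨kv, hkv, hne, hmem⟩
    exact ⟨kv.1, hmem, kv, ⟨hkv, by simpa using hne⟩, by simp⟩

theorem pvCatMin_le_iff (L : List (String × String)) (n : Nat) (hn : n < 3) :
    pvCatMin L ≤ n ↔ ∃ kv ∈ L, ¬kv.2 = "" ∧ pvCatVal kv.1 ≤ n := by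
  induction L with
  | nil => simp [pvCatMin]; omega
  | cons kv t ih =>
    simp only [pvCatMin, List.mem_cons]
    split
    · rename_i h
      rw [ih]
      constructor
      · rintro ⟨kv', h1, h2⟩; exact ⟨kv', Or.inr h1, h2⟩
      · rintro ⟨kv', h1, h2, h3⟩
        rcases h1 with rfl | h1
        · simp_all
        · exact ⟨kv', h1, h2, h3⟩
    · rename_i h
      rw [min_le_iff, ih]
      constructor
      · rintro (h1 | ⟨kv', h1, h2⟩)
        · exact ⟨kv, Or.inl rfl, by simpa using h, h1⟩
        · exact ⟨kv', Or.inr h1, h2⟩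
      · rintro ⟨kv', h1, h2, h3⟩
        rcases h1 with rfl | h1
        · exact Or.inl h3
        · exact Or.inr ⟨kv', h1, h2, h3⟩

-- ===== VERDICT (by name: the statement is the Claim_ definition above) =====
theorem determine_intent_type_spec : Claim_equal_determine_intent_type := by
  intro keywords _
  unfold Spec_determine_intent_type determine_intent_type determine_intent_type_alt
  set L := (PySem.Dict.ofList keywords).items with hL
  rw [pvFoldl_step L 3 (by omega)]
  have h3 := pvCatMin_le_three L
  rw [Nat.min_eq_right h3]
  have e0 := pvCatMin_le_iff L 0 (by omega)
  have e1 := pvCatMin_le_iff L 1 (by omega)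
  have e2 := pvCatMin_le_iff L 2 (by omega)
  have hP0 := pvAny_filter L pvCovKeys
  have hP1 := pvAny_filter L pvThrKeys
  have hP2 := pvAny_filter L pvCapKeys
  have hnot0 : pvCatMin L > 0 → ¬ (∃ kv ∈ L, ¬kv.2 = "" ∧ kv.1 ∈ pvCovKeys) := by
    rintro hgt ⟨kv', hm', hne', hc⟩
    have : pvCatVal kv'.1 = 0 := (pvCatVal_cov kv'.1).mpr hc
    have := e0.mpr ⟨kv', hm', hne', by omega⟩; omega
  have hnot1 : pvCatMin L > 1 → ¬ (∃ kv ∈ L, ¬kv.2 = "" ∧ kv.1 ∈ pvThrKeys) := by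
    rintro hgt ⟨kv', hm', hne', hc⟩
    have : pvCatVal kv'.1 = 1 := (pvCatVal_thr kv'.1).mpr hc
    have := e1.mpr ⟨kv', hm', hne', by omega⟩; omega
  have hnot2 : pvCatMin L > 2 → ¬ (∃ kv ∈ L, ¬kv.2 = "" ∧ kv.1 ∈ pvCapKeys) := by
    rintro hgt ⟨kv', hm', hne', hc⟩
    have : pvCatVal kv'.1 = 2 := (pvCatVal_cap kv'.1).mpr hc
    have := e2.mpr ⟨kv', hm', hne', by omega⟩; omega
  have hcases : pvCatMin L = 0 ∨ pvCatMin L = 1 ∨ pvCatMin L = 2 ∨ pvCatMin L = 3 := by omega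
  rcases hcases with h | h | h | h <;> rw [h]
  · -- some coverage key present
    obtain ⟨kv, hm, hne, hv⟩ := e0.mp (by omega)
    have : kv.1 ∈ pvCovKeys := (pvCatVal_cov kv.1).mp (by omega)
    rw [if_pos (hP0.mpr ⟨kv, hm, hne, this⟩)]; rfl
  · obtain ⟨kv, hm, hne, hv⟩ := e1.mp (by omega)
    have hv1 : pvCatVal kv.1 = 1 := by
      have hne0 : pvCatVal kv.1 ≠ 0 := fun h0 =>
        hnot0 (by omega) ⟨kv, hm, hne, (pvCatVal_cov kv.1).mp h0⟩
      omega
    rw [if_neg (by rw [hP0]; exact hnot0 (by omega)),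
        if_pos (hP1.mpr ⟨kv, hm, hne, (pvCatVal_thr kv.1).mp hv1⟩)]; rfl
  · obtain ⟨kv, hm, hne, hv⟩ := e2.mp (by omega)
    have hv2 : pvCatVal kv.1 = 2 := by
      have hne0 : pvCatVal kv.1 ≠ 0 := fun h0 =>
        hnot0 (by omega) ⟨kv, hm, hne, (pvCatVal_cov kv.1).mp h0⟩
      have hne1 : pvCatVal kv.1 ≠ 1 := fun h1 =>
        hnot1 (by omega) ⟨kv, hm, hne, (pvCatVal_thr kv.1).mp h1⟩
      omega
    rw [if_neg (by rw [hP0]; exact hnot0 (by omega)),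
        if_neg (by rw [hP1]; exact hnot1 (by omega)),
        if_pos (hP2.mpr ⟨kv, hm, hne, (pvCatVal_cap kv.1).mp hv2⟩)]; rfl
  · rw [if_neg (by rw [hP0]; exact hnot0 (by omega)),
        if_neg (by rw [hP1]; exact hnot1 (by omega)),
        if_neg (by rw [hP2]; exact hnot2 (by omega))]
    rfl
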